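-- pv_equiv track=rewrite | github.com/Surendra99/hackerrank | breakingRecords/__init__.py | calculate
-- ===== SOURCE A (Python) =====
-- def calculate(gameScores):
--     index=0
--     array = [0,0]
--     if len(gameScores) <= 1:
--         return array
--     minScore = gameScores[0]
--     maxScore = gameScores[0]
--     while(index < len(gameScores)-1):
--         if minScore > gameScores[index+1]:
--             minScore = gameScores[index+1]
--             array[1]+= 1
--         if maxScore < gameScores[index+1]:
--             maxScore = gameScores[index+1]
--             array[0]+= 1
--         index+=1
--     return array
-- ===== SOURCE B (Python) =====
-- def calculate(gameScores):
--     # running-max and running-min prefix tables, then count strict transitions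
--     runmax = []
--     cur = None
--     for x in gameScores:
--         cur = x if cur is None or x > cur else cur
--         runmax.append(cur)
--     runmin = []
--     cur = None
--     for x in gameScores:
--         cur = x if cur is None or x < cur else cur
--         runmin.append(cur)
--     maxCount = sum(1 for a, b in zip(runmax, runmax[1:]) if b > a)
--     minCount = sum(1 for a, b in zip(runmin, runmin[1:]) if b < a)
--     return [maxCount, minCount]
-- ===== Notes on version B (the rewrite author's own statement) =====
-- stated objective: alternative
-- what changed: B materializes running-max and running-min prefix tables in two passes and then counts strict adjacent increases/decreases in separate counting passes, instead of A's single interleaved index-while-loop updating records and counters together.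
import Mathlib
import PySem

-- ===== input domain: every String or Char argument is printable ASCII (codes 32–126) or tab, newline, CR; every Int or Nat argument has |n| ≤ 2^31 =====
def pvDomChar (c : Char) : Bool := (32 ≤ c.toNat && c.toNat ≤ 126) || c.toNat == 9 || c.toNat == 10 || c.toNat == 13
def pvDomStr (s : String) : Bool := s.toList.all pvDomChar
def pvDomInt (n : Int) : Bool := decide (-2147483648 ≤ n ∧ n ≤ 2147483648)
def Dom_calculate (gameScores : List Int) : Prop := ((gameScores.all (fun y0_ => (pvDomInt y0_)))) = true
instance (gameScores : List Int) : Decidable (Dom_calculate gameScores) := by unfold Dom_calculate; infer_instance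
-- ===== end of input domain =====

-- B builds running-max/min prefix tables and counts strict adjacent transitions in separate passes, instead of A's interleaved record-and-count while loop (alternative decomposition, same O(n) cost).


-- ===== PORT A =====
-- the while loop over index, recursing on the not-yet-visited suffix gameScores[index+1:]
def calcLoopA : List Int → Int → Int → Int → Int → Int × Int
  | [], _, _, a0, a1 => (a0, a1)
  | x :: rest, minS, maxS, a0, a1 =>
    let minS' := if minS > x then x else minS
    let a1' := if minS > x then a1 + 1 else a1
    let maxS' := if maxS < x then x else maxS
    let a0' := if maxS < x then a0 + 1 else a0
    calcLoopA rest minS' maxS' a0' a1'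

def calculate (gameScores : List Int) : List Int :=
  if gameScores.length ≤ 1 then [0, 0]
  else
    match gameScores with
    | [] => [0, 0]
    | x :: rest =>
      let (a0, a1) := calcLoopA rest x x 0 0
      [a0, a1]

-- ===== PORT B =====
-- running prefix table: first element kept, then fold f forward (B's first two loops)
def prefAux (f : Int → Int → Int) (cur : Int) : List Int → List Int
  | [] => []
  | x :: rest => let c := f cur x; c :: prefAux f c rest

def runPref (f : Int → Int → Int) : List Int → List Int
  | [] => []
  | x :: rest => x :: prefAux f x rest

-- count of adjacent pairs (a,b) = zip(xs, xs[1:]) satisfying p a b (B's sum(... for zip ...))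
def countAdj (p : Int → Int → Bool) : List Int → Int
  | a :: b :: rest => (if p a b then 1 else 0) + countAdj p (b :: rest)
  | _ => 0

def calculate_alt (gameScores : List Int) : List Int :=
  let runmax := runPref (fun c x => if x > c then x else c) gameScores
  let runmin := runPref (fun c x => if x < c then x else c) gameScores
  [countAdj (fun a b => b > a) runmax, countAdj (fun a b => b < a) runmin]

-- ===== PRECONDITION & SPEC =====
def Spec_calculate (gameScores : List Int) (out : List Int) : Prop := out = calculate_alt gameScores
instance (gameScores : List Int) (out : List Int) : Decidable (Spec_calculate gameScores out) := by unfold Spec_calculate; infer_instance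

-- ===== CLAIM (what is proved, stated in full; the proofs are below) =====
def Claim_equal_calculate : Prop := ∀ (gameScores : List Int), Dom_calculate gameScores → Spec_calculate gameScores (calculate gameScores)

-- ===== LEMMAS AND PROOFS =====
theorem calcLoopA_eq (rest : List Int) : ∀ (minS maxS a0 a1 : Int),
    calcLoopA rest minS maxS a0 a1 =
      (a0 + countAdj (fun a b => b > a) (maxS :: prefAux (fun c x => if x > c then x else c) maxS rest),
       a1 + countAdj (fun a b => b < a) (minS :: prefAux (fun c x => if x < c then x else c) minS rest)) := by
  induction rest with
  | nil => intro minS maxS a0 a1; simp [calcLoopA, countAdj, prefAux]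
  | cons x rest ih =>
    intro minS maxS a0 a1
    simp only [calcLoopA, prefAux, countAdj, ih, decide_eq_true_eq, gt_iff_lt]
    by_cases hmin : x < minS
    · by_cases hmax : maxS < x
      · simp only [if_pos hmin, if_pos hmax, Prod.mk.injEq]
        constructor <;> ring
      · simp only [if_pos hmin, if_neg hmax, if_neg (lt_irrefl maxS), Prod.mk.injEq]
        constructor <;> ring
    · by_cases hmax : maxS < x
      · simp only [if_neg hmin, if_pos hmax, if_neg (lt_irrefl minS), Prod.mk.injEq]
        constructor <;> ring
      · simp only [if_neg hmin, if_neg hmax, if_neg (lt_irrefl maxS), if_neg (lt_irrefl minS),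
                   Prod.mk.injEq]
        constructor <;> ring

-- ===== VERDICT (by name: the statement is the Claim_ definition above) =====
theorem calculate_spec : Claim_equal_calculate := by
  intro gameScores _
  unfold Spec_calculate calculate calculate_alt
  match gameScores with
  | [] => simp [runPref, countAdj]
  | x :: rest =>
    simp only [runPref, calcLoopA_eq rest x x 0 0]
    cases rest with
    | nil => simp [prefAux, countAdj]
    | cons y ys => simp
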